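-- pv_equiv track=rewrite | github.com/maxeozakh/aoc_2023 | 7/main.py | is_x_pair
-- ===== SOURCE A (Python) =====
-- def is_x_pair(h, x):
--     counter = 0
--     dict = {}
--
--     for cart in h:
--         if (cart in dict.keys()):
--             dict[cart] += 1
--             if (dict[cart] == 2):
--                 counter += 1
--         elif (cart == 'J'):
--             counter += 1
--         else:
--             dict[cart] = 1
--
--     return counter == x and len(dict.keys()) == 5 - x
-- ===== SOURCE B (Python) =====
-- def is_x_pair(h, x):
--     # set-based decomposition: distinct non-J cards, then aggregate with str.count
--     cards = set(h) - {'J'}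
--     pairs = sum(1 for c in cards if h.count(c) >= 2)
--     return pairs + h.count('J') == x and len(cards) == 5 - x
-- ===== Notes on version B (the rewrite author's own statement) =====
-- stated objective: simpler
-- what changed: Replaces the single incremental pass that maintains a counter and a mutable count dict by a set/aggregate decomposition: take the distinct non-'J' cards as a set, count pairs as the distinct cards occurring >= 2 times via h.count, add the number of 'J's, and compare.
import Mathlib
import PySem

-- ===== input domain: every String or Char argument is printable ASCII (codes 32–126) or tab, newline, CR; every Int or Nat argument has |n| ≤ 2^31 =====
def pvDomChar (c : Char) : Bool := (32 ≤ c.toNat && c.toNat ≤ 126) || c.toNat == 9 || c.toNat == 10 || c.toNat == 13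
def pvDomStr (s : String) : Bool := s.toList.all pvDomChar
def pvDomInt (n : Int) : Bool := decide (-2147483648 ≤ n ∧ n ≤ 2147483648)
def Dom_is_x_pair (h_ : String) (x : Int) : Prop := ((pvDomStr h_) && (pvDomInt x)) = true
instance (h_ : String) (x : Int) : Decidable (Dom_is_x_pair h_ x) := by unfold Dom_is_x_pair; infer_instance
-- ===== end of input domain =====

-- B replaces A's single incremental counter+dict pass by a set/aggregate decomposition
-- (distinct non-'J' cards as a set, pairs counted via h.count): objective 'simpler'.

-- ===== PORT A =====
-- one loop step of A: (counter, dict) updated per card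
def isxStepA (s : Int × PySem.Dict Char Int) (cart : Char) : Int × PySem.Dict Char Int :=
  if s.2.contains cart then
    let d := s.2.modify cart 0 (· + 1)
    if d.getD cart 0 = 2 then (s.1 + 1, d) else (s.1, d)
  else if cart = 'J' then (s.1 + 1, s.2)
  else (s.1, s.2.insert cart 1)

def is_x_pair (h_ : String) (x : Int) : Bool :=
  let st := h_.toList.foldl isxStepA (0, PySem.Dict.empty)
  decide (st.1 = x) && decide ((st.2.size : Int) = 5 - x)

-- ===== PORT B =====
-- sum(1 for c in cards if …) over the set is order-independent; ported as countP
def is_x_pair_alt (h_ : String) (x : Int) : Bool :=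
  let l := h_.toList
  let cards : PySem.Set Char := PySem.Set.diff (PySem.Set.ofList l) ['J']
  let pairs : Int := (cards.countP (fun c => 2 ≤ l.count c) : Int)
  decide (pairs + (l.count 'J' : Int) = x) && decide ((cards.length : Int) = 5 - x)

-- ===== PRECONDITION & SPEC =====
def Spec_is_x_pair (h_ : String) (x : Int) (out : Bool) : Prop := out = is_x_pair_alt h_ x
instance (h_ : String) (x : Int) (out : Bool) : Decidable (Spec_is_x_pair h_ x out) := by unfold Spec_is_x_pair; infer_instance

-- ===== CLAIM (what is proved, stated in full; the proofs are below) =====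
def Claim_equal_is_x_pair : Prop := ∀ (h_ : String) (x : Int), Dom_is_x_pair h_ x → Spec_is_x_pair h_ x (is_x_pair h_ x)

-- ===== LEMMAS AND PROOFS =====

-- the non-'J' cards of a prefix, in order
def isxNonJ (l : List Char) : List Char := l.filter (fun c => decide (c ≠ 'J'))

-- pairs already formed among the cards of l: distinct non-'J' cards seen at least twice
def isxPairs (l : List Char) : Nat :=
  (PySem.Set.ofList (isxNonJ l)).countP (fun c => 2 ≤ l.count c)

theorem isxNonJ_append_J (l : List Char) : isxNonJ (l ++ ['J']) = isxNonJ l := by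
  unfold isxNonJ; rw [List.filter_append]; simp

theorem isxNonJ_append_nonJ (l : List Char) (a : Char) (h : a ≠ 'J') :
    isxNonJ (l ++ [a]) = isxNonJ l ++ [a] := by
  unfold isxNonJ; rw [List.filter_append]; simp [h]

theorem isx_mem_nonJ {l : List Char} {c : Char} :
    c ∈ isxNonJ l ↔ c ∈ l ∧ c ≠ 'J' := by
  unfold isxNonJ; simp [List.mem_filter]

-- countP after flipping the predicate at one distinguished member of a Nodup list
theorem isx_countP_flip (S : List Char) (a : Char) (p q : Char → Bool) :
    S.Nodup → a ∈ S → (∀ c ∈ S, c ≠ a → p c = q c) →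
    S.countP q + (if p a then 1 else 0) = S.countP p + (if q a then 1 else 0) := by
  induction S with
  | nil => intro _ ha _; cases ha
  | cons hd t ih =>
      intro hn ha h
      rcases List.mem_cons.1 ha with rfl | hat
      · have hnt : a ∉ t := (List.nodup_cons.1 hn).1
        have hcong : t.countP p = t.countP q :=
          List.countP_congr (fun c hc => by
            rw [h c (List.mem_cons_of_mem _ hc) (fun e => hnt (e ▸ hc))])
        simp only [List.countP_cons, hcong]
        omega
      · have hba : hd ≠ a := fun e => ((List.nodup_cons.1 hn).1 (e ▸ hat))
        have hpb : p hd = q hd := h hd List.mem_cons_self hba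
        have hrec := ih (List.nodup_cons.1 hn).2 hat
          (fun c hc hca => h c (List.mem_cons_of_mem _ hc) hca)
        simp only [List.countP_cons, hpb]
        omega

-- the loop invariant: A's fold state is (J's so far + pairs so far, Counter of the non-J cards)
theorem isx_fold_eq (l : List Char) :
    l.foldl isxStepA (0, PySem.Dict.empty)
      = ((l.count 'J' : Int) + (isxPairs l : Int),
         PySem.Dict.counter (isxNonJ l)) := by
  induction l using List.reverseRecOn with
  | nil => rfl
  | append_singleton l a ih =>
      rw [List.foldl_append, List.foldl_cons, List.foldl_nil, ih]
      have hkeys : ∀ c : Char,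
          (PySem.Dict.counter (isxNonJ l)).contains c = decide (c ∈ isxNonJ l) := by
        intro c
        rw [PySem.Dict.contains_eq_decide_mem_keys, PySem.Dict.keys_counter]
        simp [PySem.Set.mem_ofList]
      have hSnodup : (PySem.Set.ofList (isxNonJ l)).Nodup := PySem.Set.nodup_ofList _
      by_cases hJ : a = 'J'
      · subst hJ
        have hc : (PySem.Dict.counter (isxNonJ l)).contains 'J' = false := by
          rw [hkeys]; simp [isx_mem_nonJ]
        have hpairs : isxPairs (l ++ ['J']) = isxPairs l := by
          unfold isxPairs
          rw [isxNonJ_append_J]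
          apply List.countP_congr
          intro c hc'
          have hne : 'J' ≠ c :=
            Ne.symm (isx_mem_nonJ.1 ((PySem.Set.mem_ofList _ _).mp hc')).2
          simp [List.count_append, hne]
        rw [isxStepA, hc]
        simp only [Bool.false_eq_true, if_false]
        rw [hpairs, isxNonJ_append_J]
        simp [List.count_append]
        ring
      · have hcj : (l ++ [a]).count 'J' = l.count 'J' := by
          rw [List.count_append]
          have h0 : List.count 'J' [a] = 0 :=
            List.count_eq_zero.mpr (by simp [Ne.symm hJ])
          omega
        by_cases hmem : a ∈ l
        · -- a is a non-J card already seen: 'in dict' branch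
          have hc : (PySem.Dict.counter (isxNonJ l)).contains a = true := by
            rw [hkeys]; simp [isx_mem_nonJ, hmem, hJ]
          have hdict : (PySem.Dict.counter (isxNonJ l)).modify a 0 (· + 1)
              = PySem.Dict.counter (isxNonJ (l ++ [a])) := by
            rw [isxNonJ_append_nonJ l a hJ, PySem.Dict.counter_append_singleton]
          have hcount : (isxNonJ l).count a = l.count a := by
            unfold isxNonJ
            rw [List.count_filter]
            simp [hJ]
          have hget : ((PySem.Dict.counter (isxNonJ l)).modify a 0 (· + 1)).getD a 0
              = (l.count a : Int) + 1 := by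
            rw [PySem.Dict.getD_modify_self, PySem.Dict.getD_counter, hcount]
          have hmemS : a ∈ PySem.Set.ofList (isxNonJ l) :=
            (PySem.Set.mem_ofList _ _).mpr (isx_mem_nonJ.2 ⟨hmem, hJ⟩)
          have hset : PySem.Set.ofList (isxNonJ (l ++ [a])) = PySem.Set.ofList (isxNonJ l) := by
            rw [isxNonJ_append_nonJ l a hJ, PySem.Set.ofList_append_singleton,
              PySem.Set.add_of_mem hmemS]
          have hcpos : 1 ≤ l.count a := List.one_le_count_iff.mpr hmem
          have hflip := isx_countP_flip (PySem.Set.ofList (isxNonJ l)) a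
            (fun c => 2 ≤ l.count c) (fun c => 2 ≤ (l ++ [a]).count c) hSnodup hmemS
            (by intro c _ hca
                simp [List.count_append, Ne.symm hca])
          have ha2 : (l ++ [a]).count a = l.count a + 1 := by
            simp [List.count_append]
          simp only [ha2] at hflip
          have hpairs : isxPairs (l ++ [a]) = isxPairs l + (if l.count a = 1 then 1 else 0) := by
            unfold isxPairs
            rw [hset]
            simp only [decide_eq_true_eq] at hflip
            by_cases h1 : l.count a = 1
            · rw [if_neg (by omega : ¬ (2 ≤ l.count a)),
                if_pos (by omega : 2 ≤ l.count a + 1)] at hflip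
              rw [if_pos h1]
              omega
            · rw [if_pos (by omega : 2 ≤ l.count a),
                if_pos (by omega : 2 ≤ l.count a + 1)] at hflip
              rw [if_neg h1]
              omega
          simp only [isxStepA, hc, hget, if_true]
          by_cases h1 : l.count a = 1
          · have h2 : (l.count a : Int) + 1 = 2 := by omega
            rw [if_pos h2, hdict, Prod.mk.injEq]
            refine ⟨?_, rfl⟩
            rw [hcj, hpairs]
            simp only [h1]
            push_cast
            ring
          · have h2 : ¬((l.count a : Int) + 1 = 2) := by omega
            rw [if_neg h2, hdict, Prod.mk.injEq]
            refine ⟨?_, rfl⟩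
            rw [hcj, hpairs]
            simp [h1]
        · -- a is a fresh non-J card: final else branch, dict[a] = 1
          have hc : (PySem.Dict.counter (isxNonJ l)).contains a = false := by
            rw [hkeys]; simp [isx_mem_nonJ, hmem]
          have hdict : (PySem.Dict.counter (isxNonJ l)).insert a 1
              = PySem.Dict.counter (isxNonJ (l ++ [a])) := by
            rw [isxNonJ_append_nonJ l a hJ, PySem.Dict.counter_append_singleton,
              PySem.Dict.modify, PySem.Dict.getD_of_not_contains _ _ hc]
            norm_num
          have hnotmemS : a ∉ PySem.Set.ofList (isxNonJ l) := by
            intro hmm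
            exact hmem (isx_mem_nonJ.1 ((PySem.Set.mem_ofList _ _).mp hmm)).1
          have hcnt0 : l.count a = 0 := List.count_eq_zero.mpr hmem
          have hpairs : isxPairs (l ++ [a]) = isxPairs l := by
            unfold isxPairs
            rw [isxNonJ_append_nonJ l a hJ, PySem.Set.ofList_append_singleton,
              PySem.Set.add_of_not_mem hnotmemS, List.countP_append]
            have h2 : (PySem.Set.ofList (isxNonJ l)).countP (fun c => 2 ≤ (l ++ [a]).count c)
                = (PySem.Set.ofList (isxNonJ l)).countP (fun c => 2 ≤ l.count c) := by
              apply List.countP_congr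
              intro c hc'
              have hca : a ≠ c := fun e => hnotmemS (e ▸ hc')
              simp [List.count_append, hca]
            rw [h2]
            simp [List.count_append, hcnt0]
          rw [isxStepA, hc]
          simp only [Bool.false_eq_true, if_false, if_neg hJ]
          rw [hdict, hpairs, hcj]

theorem isx_diff_eq (l : List Char) :
    PySem.Set.diff (PySem.Set.ofList l) ['J'] = PySem.Set.ofList (isxNonJ l) := by
  have hfil : PySem.Set.ofList (isxNonJ l) = (PySem.Set.ofList l).filter (fun c => decide (c ≠ 'J')) := by
    induction l using List.reverseRecOn with
    | nil => rfl
    | append_singleton l a ih =>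
        by_cases hJ : a = 'J'
        · subst hJ
          rw [isxNonJ_append_J, ih, PySem.Set.ofList_append_singleton]
          by_cases hm : 'J' ∈ PySem.Set.ofList l
          · rw [PySem.Set.add_of_mem hm]
          · rw [PySem.Set.add_of_not_mem hm, List.filter_append]
            simp
        · rw [isxNonJ_append_nonJ l a hJ, PySem.Set.ofList_append_singleton,
            PySem.Set.ofList_append_singleton]
          by_cases hm : a ∈ PySem.Set.ofList l
          · rw [PySem.Set.add_of_mem hm, PySem.Set.add_of_mem, ih]
            rw [ih] at *
            simp [List.mem_filter, hm, hJ]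
          · rw [PySem.Set.add_of_not_mem hm]
            have hmf : a ∉ (PySem.Set.ofList l).filter (fun c => decide (c ≠ 'J')) :=
              fun hx => hm (List.mem_of_mem_filter hx)
            rw [ih, PySem.Set.add_of_not_mem hmf, List.filter_append]
            simp [hJ]
  rw [hfil]
  simp [PySem.Set.diff]

theorem is_x_pair_core (h_ : String) (x : Int) : is_x_pair h_ x = is_x_pair_alt h_ x := by
  simp only [is_x_pair, is_x_pair_alt, isx_fold_eq, isx_diff_eq]
  have hsize : (PySem.Dict.counter (isxNonJ h_.toList)).size
      = (PySem.Set.ofList (isxNonJ h_.toList)).length := by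
    have := PySem.Dict.items_counter (isxNonJ h_.toList)
    simp only [PySem.Dict.size, this, List.length_map]
  have harith : ((h_.toList.count 'J' : Int) + (isxPairs h_.toList : Int) = x)
      ↔ (((PySem.Set.ofList (isxNonJ h_.toList)).countP
            (fun c => 2 ≤ h_.toList.count c) : Int) + (h_.toList.count 'J' : Int) = x) := by
    unfold isxPairs
    constructor <;> intro h <;> omega
  simp only [hsize]
  congr 1
  exact decide_eq_decide.mpr harith

-- ===== VERDICT (by name: the statement is the Claim_ definition above) =====
theorem is_x_pair_spec : Claim_equal_is_x_pair := by
  intro h_ x _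
  unfold Spec_is_x_pair
  exact is_x_pair_core h_ x
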